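-- pv_equiv track=rewrite | github.com/andreiclu/Python_basics | medium_hard_problems/meme_sum.py | meme_sum
-- ===== SOURCE A (Python) =====
-- def meme_sum(x, y):
--     if max(x,y) == 0:
--         return 0
--     anw = ''
--     while max(x,y) > 0:
--         anw = str(x%10 + y%10) + anw
--         x //=10
--         y //=10
--
--     return int(anw)
-- ===== SOURCE B (Python) =====
-- def meme_sum(x, y):
--     sx, sy = str(x), str(y)
--     n = max(len(sx), len(sy))
--     sx, sy = sx.zfill(n), sy.zfill(n)
--     return int(''.join(str(int(dx) + int(dy)) for dx, dy in zip(sx, sy)))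
-- ===== Notes on version B (the rewrite author's own statement) =====
-- stated objective: idiomatic
-- what changed: B replaces A's arithmetic %10 // 10 LSB-first loop that prepends digit-sum strings with a string/digit-array formulation: decimal strings zero-padded to equal width, one MSB-first pass over the zipped digit pairs joined into the result.
-- outside the precondition, e.g. on meme_sum(-3, 5): A returns 12, B raises ValueError
import Mathlib
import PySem

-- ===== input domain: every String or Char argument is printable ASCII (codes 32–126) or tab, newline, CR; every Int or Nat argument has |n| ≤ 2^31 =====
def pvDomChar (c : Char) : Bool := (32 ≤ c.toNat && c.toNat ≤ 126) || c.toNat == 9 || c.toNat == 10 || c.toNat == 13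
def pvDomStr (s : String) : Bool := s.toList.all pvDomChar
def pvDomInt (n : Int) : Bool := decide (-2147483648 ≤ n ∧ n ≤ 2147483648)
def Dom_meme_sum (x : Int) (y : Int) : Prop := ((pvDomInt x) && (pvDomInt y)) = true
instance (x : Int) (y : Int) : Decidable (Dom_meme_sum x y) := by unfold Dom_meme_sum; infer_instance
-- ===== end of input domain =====

-- B re-implements the no-carry digit sum on zero-padded decimal strings, MSB-first with join,
-- instead of A's arithmetic %10 // 10 LSB-first loop that prepends; objective: idiomatic.

-- ===== PORT A =====
-- bounds on x // 10 used only for the termination of A's while-loop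
theorem pv_fd10_lt {a : Int} (h : 0 < a) : PySem.Int.floordiv a 10 < a := by
  rw [PySem.Int.floordiv_lt_iff_lt_mul (by norm_num)]; omega

theorem pv_fd10_nonpos {a : Int} (h : a ≤ 0) : PySem.Int.floordiv a 10 ≤ 0 := by
  have := (PySem.Int.floordiv_lt_iff_lt_mul (a := a) (b := 10) (q := 1) (by norm_num)).mpr (by omega)
  omega

-- while max(x,y) > 0: anw = str(x%10 + y%10) + anw; x //= 10; y //= 10
def memeLoop (x y : Int) (anw : List Char) : List Char :=
  if 0 < max x y then
    memeLoop (PySem.Int.floordiv x 10) (PySem.Int.floordiv y 10)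
      (PySem.Int.toChars (PySem.Int.mod x 10 + PySem.Int.mod y 10) ++ anw)
  else anw
termination_by x.toNat + y.toNat
decreasing_by
  have hx : PySem.Int.floordiv x 10 < x ∨ (x ≤ 0 ∧ PySem.Int.floordiv x 10 ≤ 0) := by
    by_cases hx0 : 0 < x
    · exact Or.inl (pv_fd10_lt hx0)
    · exact Or.inr ⟨by omega, pv_fd10_nonpos (by omega)⟩
  have hy : PySem.Int.floordiv y 10 < y ∨ (y ≤ 0 ∧ PySem.Int.floordiv y 10 ≤ 0) := by
    by_cases hy0 : 0 < y
    · exact Or.inl (pv_fd10_lt hy0)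
    · exact Or.inr ⟨by omega, pv_fd10_nonpos (by omega)⟩
  omega

-- int(anw): under Pre_ the loop has run and anw is all digits, so ofChars? is some; the
-- getD 0 default is unreachable under Pre_ (int('') raises only for inputs outside Pre_)
def meme_sum (x : Int) (y : Int) : Int :=
  if max x y = 0 then 0
  else (PySem.Int.ofChars? (memeLoop x y [])).getD 0

-- ===== PORT B =====
-- int of a digit character: under Pre_ every zipped character is a decimal digit, so the
-- getD 0 default is unreachable (int raises on non-digits only outside Pre_)
def meme_sum_alt (x : Int) (y : Int) : Int :=
  let cx := PySem.Int.toChars x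
  let cy := PySem.Int.toChars y
  let n : Int := max (cx.length : Int) (cy.length : Int)
  let px := PySem.Chars.zfill cx n
  let py := PySem.Chars.zfill cy n
  (PySem.Int.ofChars? (PySem.Chars.join []
    ((px.zip py).map (fun p =>
      PySem.Int.toChars ((PySem.Int.ofChars? [p.1]).getD 0 + (PySem.Int.ofChars? [p.2]).getD 0))))).getD 0

-- ===== PRECONDITION & SPEC =====
-- Pre_ excludes negative arguments: there A's %10-//10 digit extraction either never drains the
-- negative operand (an accidental 9-padded result, e.g. meme_sum(-3,5) = 12) or leaves anw empty
-- (int('') ValueError for two negatives), while B's digit parse itself raises ValueError on '-'.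
def Pre_meme_sum (x : Int) (y : Int) : Prop := 0 ≤ x ∧ 0 ≤ y
instance (x : Int) (y : Int) : Decidable (Pre_meme_sum x y) := by unfold Pre_meme_sum; infer_instance
def pvWitness_meme_sum : Int × Int := (26, 39)

def Spec_meme_sum (x : Int) (y : Int) (out : Int) : Prop := out = meme_sum_alt x y
instance (x : Int) (y : Int) (out : Int) : Decidable (Spec_meme_sum x y out) := by unfold Spec_meme_sum; infer_instance

-- ===== CLAIM (what is proved, stated in full; the proofs are below) =====
def Claim_equal_meme_sum : Prop := ∀ (x : Int) (y : Int), Dom_meme_sum x y → Pre_meme_sum x y → Spec_meme_sum x y (meme_sum x y)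

-- ===== LEMMAS AND PROOFS =====

-- str(n) for a natural number, by its own recursion (= Nat.toDigits 10)
def myDigs (a : Nat) : List Char :=
  if _h : a < 10 then [Nat.digitChar a]
  else myDigs (a / 10) ++ [Nat.digitChar (a % 10)]
termination_by a
decreasing_by exact Nat.div_lt_self (by omega) (by omega)

theorem toDigitsCore_eq : ∀ f n acc, n < f →
    Nat.toDigitsCore 10 f n acc = myDigs n ++ acc := by
  intro f
  induction f with
  | zero => omega
  | succ f ih =>
    intro n acc h
    rw [Nat.toDigitsCore]
    by_cases h10 : n < 10
    · have : n / 10 = 0 := Nat.div_eq_of_lt h10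
      simp [this, myDigs, h10, Nat.mod_eq_of_lt h10]
    · have hne : n / 10 ≠ 0 := by omega
      have hlt : n / 10 < f := by omega
      simp only [hne, if_false]
      rw [ih _ _ hlt]
      conv_rhs => rw [myDigs]
      simp [h10]
  
theorem toChars_natCast (a : Nat) : PySem.Int.toChars (a : Int) = myDigs a := by
  have h : ¬ ((a : Int) < 0) := by omega
  simp only [PySem.Int.toChars, h, if_false, Int.toNat_natCast, Nat.toDigits]
  simpa using toDigitsCore_eq (a + 1) a [] (by omega)

theorem myDigs_ne_nil (a : Nat) : myDigs a ≠ [] := by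
  rw [myDigs]; split <;> simp

theorem myDigs_length_pos (a : Nat) : 1 ≤ (myDigs a).length := by
  have := myDigs_ne_nil a
  cases h : myDigs a with
  | nil => exact absurd h this
  | cons c cs => simp

theorem myDigs_len_lt10 {a : Nat} (h : a < 10) : (myDigs a).length = 1 := by
  rw [myDigs]; simp [h]

theorem myDigs_len_ge10 {a : Nat} (h : ¬ a < 10) :
    (myDigs a).length = (myDigs (a / 10)).length + 1 := by
  conv_lhs => rw [myDigs]
  simp [h]

theorem myDigs_ge10_eq {a : Nat} (h : ¬ a < 10) :
    myDigs a = myDigs (a / 10) ++ [Nat.digitChar (a % 10)] := by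
  conv_lhs => rw [myDigs]
  simp [h]

theorem lt10_of_len_le1 {a : Nat} (h : (myDigs a).length ≤ 1) : a < 10 := by
  by_contra h10
  have := myDigs_len_ge10 h10
  have := myDigs_length_pos (a / 10)
  omega

theorem myDigs_mem (a : Nat) : ∀ c ∈ myDigs a, ∃ d, d < 10 ∧ c = Nat.digitChar d := by
  induction a using Nat.strong_induction_on with
  | _ a ih =>
    intro c hc
    rw [myDigs] at hc
    by_cases h : a < 10 <;> simp [h] at hc
    · exact ⟨a, h, hc⟩
    · rcases hc with hc | hc
      · exact ih (a / 10) (Nat.div_lt_self (by omega) (by omega)) c hc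
      · exact ⟨a % 10, by omega, hc⟩

theorem digitChar_not_sign {d : Nat} (h : d < 10) :
    ¬ (Nat.digitChar d = '+' ∨ Nat.digitChar d = '-') := by
  interval_cases d <;> decide

theorem dval {d : Nat} (h : d < 10) :
    (PySem.Int.ofChars? [Nat.digitChar d]).getD 0 = (d : Int) := by
  interval_cases d <;> decide

-- zero-padding to width n
def padTo (cs : List Char) (n : Nat) : List Char :=
  List.replicate (n - cs.length) '0' ++ cs

theorem length_padTo {cs : List Char} {n : Nat} (h : cs.length ≤ n) :
    (padTo cs n).length = n := by
  simp [padTo]; omega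

theorem zfill_eq (a n : Nat) :
    PySem.Chars.zfill (myDigs a) (n : Int) = padTo (myDigs a) n := by
  rw [PySem.Chars.zfill.eq_def, padTo]
  by_cases h : (n : Int) ≤ ((myDigs a).length : Int)
  · have : n - (myDigs a).length = 0 := by omega
    simp [h, this]
  · cases hm : myDigs a with
    | nil => exact absurd hm (myDigs_ne_nil a)
    | cons c rest =>
      obtain ⟨d, hd, rfl⟩ := myDigs_mem a c (by rw [hm]; simp)
      simp only [if_false, digitChar_not_sign hd, if_false]
      rw [← hm]
      simp
      omega

-- the common digit-sum string: k positions, LSB recursion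
def G : Nat → Nat → Nat → List Char
  | 0, _, _ => []
  | k+1, a, b => G k (a / 10) (b / 10) ++ myDigs (a % 10 + b % 10)

theorem padTo_succ {a k : Nat} (hk : 1 ≤ k) :
    padTo (myDigs a) (k + 1) = padTo (myDigs (a / 10)) k ++ [Nat.digitChar (a % 10)] := by
  by_cases h : a < 10
  · have h0 : a / 10 = 0 := Nat.div_eq_of_lt h
    have hm : a % 10 = a := Nat.mod_eq_of_lt h
    rw [h0, hm]
    show padTo (myDigs a) (k+1) = padTo (myDigs 0) k ++ [Nat.digitChar a]
    rw [myDigs, padTo, padTo]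
    simp only [h, dif_pos, List.length_singleton]
    have hm0 : myDigs 0 = ['0'] := by rw [myDigs]; rfl
    rw [hm0]
    have h1 : k + 1 - 1 = k := by omega
    have h2 : List.replicate (k - 1) '0' ++ ['0'] = List.replicate k '0' := by
      have h3 : List.replicate k '0' = List.replicate ((k-1)+1) '0' := by congr 1; omega
      rw [h3, List.replicate_succ' (n := k-1)]
    simp only [List.length_singleton, h1]
    rw [h2]
  · conv_lhs => rw [myDigs_ge10_eq h]
    rw [padTo, padTo]
    simp only [List.length_append, List.length_singleton]
    have h4 : k + 1 - ((myDigs (a/10)).length + 1) = k - (myDigs (a/10)).length := by omega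
    rw [h4, ← List.append_assoc]

theorem quot_len_le {a k : Nat} (hk : 1 ≤ k) (hl : (myDigs a).length ≤ k + 1) :
    (myDigs (a / 10)).length ≤ k := by
  by_cases h : a < 10
  · rw [Nat.div_eq_of_lt h, myDigs_len_lt10 (by omega)]; omega
  · have := myDigs_len_ge10 h; omega

theorem L2 : ∀ k a b, (myDigs a).length ≤ k → (myDigs b).length ≤ k →
    (((padTo (myDigs a) k).zip (padTo (myDigs b) k)).map (fun p =>
      PySem.Int.toChars ((PySem.Int.ofChars? [p.1]).getD 0 + (PySem.Int.ofChars? [p.2]).getD 0))).flatten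
    = G k a b := by
  intro k
  induction k with
  | zero => intro a b ha _; have := myDigs_length_pos a; omega
  | succ k ih =>
    intro a b ha hb
    by_cases hk : k = 0
    · subst hk
      have ha10 : a < 10 := lt10_of_len_le1 ha
      have hb10 : b < 10 := lt10_of_len_le1 hb
      have hpa : padTo (myDigs a) 1 = [Nat.digitChar a] := by
        rw [myDigs, padTo]; simp [ha10]
      have hpb : padTo (myDigs b) 1 = [Nat.digitChar b] := by
        rw [myDigs, padTo]; simp [hb10]
      rw [hpa, hpb]
      simp only [List.zip_cons_cons, List.zip_nil_right, List.map_cons, List.map_nil,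
        List.flatten_cons, List.flatten_nil, List.append_nil]
      rw [dval ha10, dval hb10, G, G]
      rw [Nat.mod_eq_of_lt ha10, Nat.mod_eq_of_lt hb10]
      rw [← Nat.cast_add, toChars_natCast]
      simp
    · have hk1 : 1 ≤ k := by omega
      rw [padTo_succ hk1, padTo_succ hk1]
      rw [List.zip_append (by rw [length_padTo (quot_len_le hk1 ha), length_padTo (quot_len_le hk1 hb)])]
      rw [List.map_append, List.flatten_append]
      rw [ih _ _ (quot_len_le hk1 ha) (quot_len_le hk1 hb)]
      rw [G]
      congr 1
      simp only [List.zip_cons_cons, List.zip_nil_right, List.map_cons, List.map_nil,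
        List.flatten_cons, List.flatten_nil, List.append_nil]
      rw [dval (Nat.mod_lt a (by omega)), dval (Nat.mod_lt b (by omega)),
        ← Nat.cast_add, toChars_natCast]

-- A's loop, digit-string form on naturals
def sA (a b : Nat) : List Char :=
  if _h : a = 0 ∧ b = 0 then []
  else sA (a / 10) (b / 10) ++ myDigs (a % 10 + b % 10)
termination_by a + b
decreasing_by omega

theorem memeLoop_eq_sA : ∀ (n a b : Nat) (acc : List Char), a + b = n →
    memeLoop (a : Int) (b : Int) acc = sA a b ++ acc := by
  intro n
  induction n using Nat.strong_induction_on with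
  | _ n ih =>
    intro a b acc hn
    rw [memeLoop, sA]
    by_cases h : a = 0 ∧ b = 0
    · obtain ⟨rfl, rfl⟩ := h
      simp
    · have hmax : 0 < max (a : Int) (b : Int) := by omega
      rw [if_pos hmax, dif_neg h]
      have e1 : PySem.Int.floordiv (a : Int) 10 = ((a / 10 : Nat) : Int) := by
        rw [PySem.Int.floordiv_eq_ediv_of_pos (by norm_num)]; omega
      have e2 : PySem.Int.floordiv (b : Int) 10 = ((b / 10 : Nat) : Int) := by
        rw [PySem.Int.floordiv_eq_ediv_of_pos (by norm_num)]; omega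
      have e3 : PySem.Int.mod (a : Int) 10 = ((a % 10 : Nat) : Int) := by
        rw [PySem.Int.mod_eq_emod_of_pos (by norm_num)]; omega
      have e4 : PySem.Int.mod (b : Int) 10 = ((b % 10 : Nat) : Int) := by
        rw [PySem.Int.mod_eq_emod_of_pos (by norm_num)]; omega
      rw [e1, e2, e3, e4, ← Nat.cast_add, toChars_natCast]
      rw [ih (a / 10 + b / 10) (by omega) _ _ _ rfl]
      rw [List.append_assoc]

theorem sA_eq_G : ∀ k a b, ¬ (a = 0 ∧ b = 0) →
    k = max (myDigs a).length (myDigs b).length → sA a b = G k a b := by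
  intro k
  induction k with
  | zero => intro a b _ hk; have := myDigs_length_pos a; omega
  | succ k ih =>
    intro a b h hk
    rw [sA, G, dif_neg h]
    congr 1
    by_cases hk0 : k = 0
    · subst hk0
      have ha10 : a < 10 := lt10_of_len_le1 (by omega)
      have hb10 : b < 10 := lt10_of_len_le1 (by omega)
      rw [Nat.div_eq_of_lt ha10, Nat.div_eq_of_lt hb10, sA]
      simp [G]
    · have hbig : ¬ (a < 10) ∨ ¬ (b < 10) := by
        by_contra hc
        rw [not_or, not_not, not_not] at hc
        rw [myDigs_len_lt10 hc.1, myDigs_len_lt10 hc.2] at hk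
        omega
      have hq : ¬ (a / 10 = 0 ∧ b / 10 = 0) := by
        rcases hbig with hb' | hb'
        · intro ⟨h1, _⟩; exact hb' (by omega)
        · intro ⟨_, h2⟩; exact hb' (by omega)
      apply ih _ _ hq
      -- max length of the quotients is k
      by_cases ha : a < 10 <;> by_cases hb' : b < 10
      · exact absurd (by omega : a < 10 ∧ b < 10) (by rcases hbig with h'|h' <;> tauto)
      · rw [Nat.div_eq_of_lt ha, show myDigs 0 = ['0'] from by rw [myDigs]; rfl]
        have h2 := myDigs_len_ge10 hb'
        rw [myDigs_len_lt10 ha] at hk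
        have := myDigs_length_pos (b / 10)
        simp only [List.length_singleton]
        omega
      · rw [Nat.div_eq_of_lt hb', show myDigs 0 = ['0'] from by rw [myDigs]; rfl]
        have h1 := myDigs_len_ge10 ha
        rw [myDigs_len_lt10 hb'] at hk
        have := myDigs_length_pos (a / 10)
        simp only [List.length_singleton]
        omega
      · have h1 := myDigs_len_ge10 ha
        have h2 := myDigs_len_ge10 hb'
        have := myDigs_length_pos (a / 10)
        have := myDigs_length_pos (b / 10)
        omega

theorem join_nil_flatten (l : List (List Char)) : PySem.Chars.join [] l = l.flatten := by
  show List.intercalate [] l = l.flatten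
  rw [List.intercalate]
  induction l with
  | nil => rfl
  | cons x xs ih =>
    cases xs with
    | nil => rfl
    | cons y ys =>
      rw [List.intersperse_cons₂]
      simp only [List.flatten_cons] at *
      simp [← ih]

-- the two digit strings coincide on nonnegative inputs
theorem strings_eq (a b : Nat) (h : ¬ (a = 0 ∧ b = 0)) :
    memeLoop (a : Int) (b : Int) [] =
    PySem.Chars.join []
      (((PySem.Chars.zfill (PySem.Int.toChars (a : Int))
            (max ((PySem.Int.toChars (a : Int)).length : Int) ((PySem.Int.toChars (b : Int)).length : Int))).zip
        (PySem.Chars.zfill (PySem.Int.toChars (b : Int))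
            (max ((PySem.Int.toChars (a : Int)).length : Int) ((PySem.Int.toChars (b : Int)).length : Int)))).map
        (fun p => PySem.Int.toChars ((PySem.Int.ofChars? [p.1]).getD 0 + (PySem.Int.ofChars? [p.2]).getD 0))) := by
  rw [toChars_natCast, toChars_natCast]
  have hmax : max ((myDigs a).length : Int) ((myDigs b).length : Int)
      = ((max (myDigs a).length (myDigs b).length : Nat) : Int) := by
    rw [Nat.cast_max]
  rw [hmax, zfill_eq, zfill_eq, join_nil_flatten]
  rw [L2 _ a b (le_max_left _ _) (le_max_right _ _)]
  rw [memeLoop_eq_sA (a + b) a b [] rfl, List.append_nil]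
  exact sA_eq_G _ a b h rfl

-- ===== VERDICT (by name: the statement is the Claim_ definition above) =====
theorem meme_sum_spec : Claim_equal_meme_sum := by
  intro x y _ hpre
  unfold Spec_meme_sum
  obtain ⟨hx, hy⟩ := hpre
  obtain ⟨a, rfl⟩ : ∃ a : Nat, x = (a : Int) := ⟨x.toNat, (Int.toNat_of_nonneg hx).symm⟩
  obtain ⟨b, rfl⟩ : ∃ b : Nat, y = (b : Int) := ⟨y.toNat, (Int.toNat_of_nonneg hy).symm⟩
  by_cases h : a = 0 ∧ b = 0
  · obtain ⟨rfl, rfl⟩ := h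
    decide
  · have hmax : ¬ (max (a : Int) (b : Int) = 0) := by omega
    rw [meme_sum, if_neg hmax, meme_sum_alt]
    rw [strings_eq a b h]
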